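-- pv_equiv track=rewrite | github.com/sanju63030/intern_assignment | transform_ass.py | transform_events
-- ===== SOURCE A (Python) =====
-- def transform_events(events):
--     transformed_events = []
--     num_events = len(events)
--
--     for i, event in enumerate(events):
--         prev_line = events[i - 1] if i > 0 else 'Dialogue: 0,0:00:00.00,0:00:00.00,Default,,0,0,0,,...'
--         next_line = events[i + 1] if i < num_events - 1 else 'Dialogue: 0,0:00:00.00,0:00:00.00,Default,,0,0,0,,...'
--
--         current_line = event
--         transformed_event = f"{prev_line}\n{current_line}\n{next_line}\n"
--         transformed_events.append(transformed_event)
--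
--     return transformed_events
-- ===== SOURCE B (Python) =====
-- SENTINEL = 'Dialogue: 0,0:00:00.00,0:00:00.00,Default,,0,0,0,,...'
--
-- def transform_events(events):
--     # Streaming fold with one-element lookbehind: carry (prev, cur); each new
--     # element serves as the 'next' of the pending cur, and a final flush closes
--     # the last window with the sentinel. No indexing, no length, no padding.
--     out = []
--     prev = SENTINEL
--     cur = None
--     for nxt in events:
--         if cur is not None:
--             out.append(f"{prev}\n{cur}\n{nxt}\n")
--             prev = cur
--         cur = nxt
--     if cur is not None:
--         out.append(f"{prev}\n{cur}\n{SENTINEL}\n")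
--     return out
-- ===== Notes on version B (the rewrite author's own statement) =====
-- stated objective: alternative
-- what changed: B replaces A's indexed enumerate loop (random access to events[i-1]/events[i+1] with boundary conditionals) by a streaming fold that carries only (prev, cur) state, emits a window when the next element arrives, and flushes the last window with the sentinel after the loop.
import Mathlib
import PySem

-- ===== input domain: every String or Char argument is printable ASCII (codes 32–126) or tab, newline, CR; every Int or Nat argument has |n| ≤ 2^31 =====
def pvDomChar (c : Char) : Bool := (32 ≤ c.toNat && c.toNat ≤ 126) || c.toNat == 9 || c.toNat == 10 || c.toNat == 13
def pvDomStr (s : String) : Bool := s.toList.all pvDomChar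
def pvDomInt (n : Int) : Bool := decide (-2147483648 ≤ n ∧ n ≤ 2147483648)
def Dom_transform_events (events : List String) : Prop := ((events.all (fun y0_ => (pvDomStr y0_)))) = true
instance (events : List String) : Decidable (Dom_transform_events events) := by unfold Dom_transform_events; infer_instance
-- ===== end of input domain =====

-- B replaces A's indexed loop with boundary conditionals by a streaming fold carrying
-- (prev, cur) state, emitting a window per new element and flushing the last one; same output.

-- the default 'Dialogue: …' line both programs use at the boundaries
def pvSent : String := "Dialogue: 0,0:00:00.00,0:00:00.00,Default,,0,0,0,,..."

-- ===== PORT A =====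
-- enumerate/index loop; events[i-1] and events[i+1] are only read when the index is in
-- range, so pyGetD's default is never used.
def transform_events (events : List String) : List String :=
  let num_events : Int := events.length
  (PySem.List.enumerate events 0).foldl
    (fun acc ie =>
      let i := ie.1
      let event := ie.2
      let prev_line := if 0 < i then PySem.List.pyGetD events (i - 1) pvSent else pvSent
      let next_line := if i < num_events - 1 then PySem.List.pyGetD events (i + 1) pvSent else pvSent
      acc ++ [prev_line ++ "\n" ++ event ++ "\n" ++ next_line ++ "\n"])
    []

-- ===== PORT B =====
-- streaming fold over events with state (out, prev, cur : Option String); final flush.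
def transform_events_alt (events : List String) : List String :=
  let st := events.foldl
    (fun (st : List String × String × Option String) nxt =>
      match st with
      | (out, prev, some cur) => (out ++ [prev ++ "\n" ++ cur ++ "\n" ++ nxt ++ "\n"], cur, some nxt)
      | (out, prev, none) => (out, prev, some nxt))
    ([], pvSent, none)
  match st with
  | (out, prev, some cur) => out ++ [prev ++ "\n" ++ cur ++ "\n" ++ pvSent ++ "\n"]
  | (out, _, none) => out

-- ===== PRECONDITION & SPEC =====
def Spec_transform_events (events : List String) (out : List String) : Prop := out = transform_events_alt events
instance (events : List String) (out : List String) : Decidable (Spec_transform_events events out) := by unfold Spec_transform_events; infer_instance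

-- ===== CLAIM (what is proved, stated in full; the proofs are below) =====
def Claim_equal_transform_events : Prop := ∀ (events : List String), Dom_transform_events events → Spec_transform_events events (transform_events events)

-- ===== LEMMAS AND PROOFS =====

-- common recursive shape of both results: one window per element, previous element threaded through
def pvGlue (p c n : String) : String := p ++ "\n" ++ c ++ "\n" ++ n ++ "\n"

def pvWin : String → List String → List String
  | _, [] => []
  | p, c :: t => pvGlue p c (t.headD pvSent) :: pvWin c t

-- B's streaming fold computes pvWin
lemma pvWinB_aux (es : List String) : ∀ (out : List String) (prev cur : String),
    (match es.foldl
      (fun (st : List String × String × Option String) nxt =>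
        match st with
        | (out, prev, some cur) => (out ++ [prev ++ "\n" ++ cur ++ "\n" ++ nxt ++ "\n"], cur, some nxt)
        | (out, prev, none) => (out, prev, some nxt))
      (out, prev, some cur) with
     | (out, prev, some cur) => out ++ [prev ++ "\n" ++ cur ++ "\n" ++ pvSent ++ "\n"]
     | (out, _, none) => out) = out ++ pvWin prev (cur :: es) := by
  induction es with
  | nil => intro out prev cur; simp [pvWin, pvGlue]
  | cons x t ih =>
    intro out prev cur
    simp only [List.foldl_cons]
    rw [ih (out ++ [prev ++ "\n" ++ cur ++ "\n" ++ x ++ "\n"]) cur x]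
    simp [pvWin, pvGlue]

lemma pvWinB (events : List String) : transform_events_alt events = pvWin pvSent events := by
  cases events with
  | nil => rfl
  | cons c t =>
    show (match (c :: t).foldl _ ([], pvSent, none) with
      | (out, prev, some cur) => out ++ [prev ++ "\n" ++ cur ++ "\n" ++ pvSent ++ "\n"]
      | (out, _, none) => out) = _
    rw [List.foldl_cons]
    exact pvWinB_aux t [] pvSent c

-- A's indexed loop body, as a map function
def pvGA (events : List String) (ie : Int × String) : String :=
  (if 0 < ie.1 then PySem.List.pyGetD events (ie.1 - 1) pvSent else pvSent) ++ "\n" ++ ie.2 ++ "\n" ++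
    (if ie.1 < (events.length : Int) - 1 then PySem.List.pyGetD events (ie.1 + 1) pvSent else pvSent) ++ "\n"

-- A's loop over any suffix computes pvWin of that suffix
lemma pvWinA (events : List String) : ∀ (suff : List String) (k : Nat), events.drop k = suff →
    (PySem.List.enumerate suff (k : Int)).map (pvGA events)
      = pvWin (if k = 0 then pvSent else PySem.List.pyGetD events ((k : Int) - 1) pvSent) suff := by
  intro suff
  induction suff with
  | nil => intro k _; simp [PySem.List.enumerate_nil, pvWin]
  | cons c rest ih =>
    intro k hk
    have hk1 : events.drop (k + 1) = rest := by
      have := congrArg (List.drop 1) hk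
      simpa [List.drop_drop, Nat.add_comm] using this
    have hck : events[k]? = some c := by
      have := congrArg List.head? hk
      simpa [List.head?_drop] using this
    have hklen : k < events.length := by
      obtain ⟨h1, -⟩ := List.getElem?_eq_some_iff.mp hck; exact h1
    have hcast : (k : Int) + 1 = ((k + 1 : Nat) : Int) := by push_cast; ring
    have hnext : (if (k : Int) < (events.length : Int) - 1 then PySem.List.pyGetD events ((k : Int) + 1) pvSent else pvSent)
        = rest.headD pvSent := by
      cases rest with
      | nil =>
        have hlen : events.length = k + 1 := by
          have := congrArg List.length hk1
          simp at this
          omega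
        have hno : ¬ ((k : Int) < (events.length : Int) - 1) := by
          rw [hlen]; push_cast; omega
        simp [hno]
      | cons r rest' =>
        have hr : events[k + 1]? = some r := by
          have := congrArg List.head? hk1
          simpa [List.head?_drop] using this
        have hlen : k + 1 < events.length := by
          obtain ⟨h1, -⟩ := List.getElem?_eq_some_iff.mp hr; exact h1
        have hlt : (k : Int) < (events.length : Int) - 1 := by
          have h2 : ((k : Nat) : Int) + 1 < (events.length : Int) := by exact_mod_cast hlen
          omega
        have hv : PySem.List.pyGetD events ((k : Int) + 1) pvSent = r := by
          rw [hcast, PySem.List.pyGetD_natCast]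
          simp [List.getD_eq_getElem?_getD, hr]
        simp [hlt, hv]
    have hprev : (if 0 < (k : Int) then PySem.List.pyGetD events ((k : Int) - 1) pvSent else pvSent)
        = (if k = 0 then pvSent else PySem.List.pyGetD events ((k : Int) - 1) pvSent) := by
      by_cases h0 : k = 0
      · subst h0; simp
      · simp [h0]
    have hhead : pvGA events ((k : Int), c) = pvGlue (if k = 0 then pvSent else PySem.List.pyGetD events ((k : Int) - 1) pvSent) c (rest.headD pvSent) := by
      unfold pvGA pvGlue
      rw [← hprev, ← hnext]
    have hc : PySem.List.pyGetD events (((k + 1 : Nat) : Int) - 1) pvSent = c := by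
      have h1 : (((k + 1 : Nat) : Int) - 1) = ((k : Nat) : Int) := by push_cast; ring
      rw [h1, PySem.List.pyGetD_natCast]
      simp [List.getD_eq_getElem?_getD, hck]
    rw [PySem.List.enumerate_cons, List.map_cons, hcast, ih (k + 1) hk1,
      if_neg (Nat.succ_ne_zero k), hc, pvWin, hhead]

-- ===== VERDICT (by name: the statement is the Claim_ definition above) =====
theorem transform_events_spec : Claim_equal_transform_events := by
  intro events _
  unfold Spec_transform_events
  rw [pvWinB]
  show List.foldl (fun acc ie => acc ++ [pvGA events ie]) [] (PySem.List.enumerate events 0) = _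
  rw [PySem.List.foldl_append_singleton_eq_map, List.nil_append]
  have hA := pvWinA events events 0 rfl
  norm_num at hA
  exact hA
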